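-- pv_equiv track=rewrite | github.com/Alex6430/rijndael_application | application.py | affine_transformation
-- ===== SOURCE A (Python) =====
-- def xor(x, length):
--     length = length >> 1
--     while length:
--         x = ((x >> length) ^ x & ((1 << length) - 1))
--         length = length >> 1
--     return x
--
-- def affine_transformation(x):
--     # A = [0x8F, 0xC7, 0xE3, 0xF1, 0xF8, 0x7C, 0x3E, 0x1F]
--     A = [0xF8, 0x7C, 0x3E, 0x1F, 0x8F, 0xC7, 0xE3, 0xF1]
--     result = 0
--     i = 0
--     while i < 8:
--         result = (result << 1) + xor(A[i] & x, 8)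
--         i += 1
--
--     return result ^ 0x63
-- ===== SOURCE B (Python) =====
-- def affine_transformation(x):
--     t = x & 0xFF
--     def rotl8(v, k):
--         return ((v << k) | (v >> (8 - k))) & 0xFF
--     b = t ^ rotl8(t, 1) ^ rotl8(t, 2) ^ rotl8(t, 3) ^ rotl8(t, 4)
--     return b ^ 0x63
-- ===== Notes on version B (the rewrite author's own statement) =====
-- stated objective: idiomatic
-- what changed: Replaces the 8-iteration matrix-row loop with its log-tree parity helper by the standard loop-free rotation closed form: mask to a byte, XOR the byte with its left-rotations by 1..4 bits, XOR 0x63.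
import Mathlib
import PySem

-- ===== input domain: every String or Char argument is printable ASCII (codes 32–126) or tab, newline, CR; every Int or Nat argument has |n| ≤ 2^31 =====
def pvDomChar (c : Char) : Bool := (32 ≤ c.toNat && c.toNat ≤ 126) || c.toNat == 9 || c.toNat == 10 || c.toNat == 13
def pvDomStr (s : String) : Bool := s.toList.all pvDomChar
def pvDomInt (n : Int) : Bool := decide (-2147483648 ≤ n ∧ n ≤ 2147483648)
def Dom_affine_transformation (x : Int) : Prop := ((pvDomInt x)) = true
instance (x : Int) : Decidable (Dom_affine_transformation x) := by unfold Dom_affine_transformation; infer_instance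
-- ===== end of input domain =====

-- B replaces A's 8-row matrix loop and log-tree parity helper by the standard
-- rotation-based closed form of the Rijndael affine transformation (idiomatic, loop-free).

-- ===== PORT A =====
-- Python's 'xor(x, length)' while-loop; 'fuel' is a termination gadget only:
-- the loop halves 'length' each pass, so 'fuel = length' always suffices.
def pyXorLoop (x : Int) (length : Nat) (fuel : Nat) : Int :=
  match fuel with
  | 0 => x
  | f + 1 =>
    if length = 0 then x
    else pyXorLoop (PySem.Int.bxor (x >>> length) (PySem.Int.band x ((1 <<< length) - 1)))
        (length >>> 1) f

-- Python's 'xor(x, length)' (called only with length = 8, a nonnegative literal)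
def pyXor (x : Int) (length : Nat) : Int :=
  pyXorLoop x (length >>> 1) (length >>> 1)

def affine_transformation (x : Int) : Int :=
  let A : List Int := [0xF8, 0x7C, 0x3E, 0x1F, 0x8F, 0xC7, 0xE3, 0xF1]
  let result := A.foldl (fun (result : Int) a => (result <<< (1 : Nat)) + pyXor (PySem.Int.band a x) 8) 0
  PySem.Int.bxor result 0x63

-- ===== PORT B =====
def rotl8 (v : Int) (k : Nat) : Int :=
  PySem.Int.band (PySem.Int.bor (v <<< k) (v >>> (8 - k))) 0xFF

def affine_transformation_alt (x : Int) : Int :=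
  let t := PySem.Int.band x 0xFF
  let b := PySem.Int.bxor (PySem.Int.bxor (PySem.Int.bxor (PySem.Int.bxor t (rotl8 t 1))
      (rotl8 t 2)) (rotl8 t 3)) (rotl8 t 4)
  PySem.Int.bxor b 0x63

-- ===== PRECONDITION & SPEC =====
def Spec_affine_transformation (x : Int) (out : Int) : Prop := out = affine_transformation_alt x
instance (x : Int) (out : Int) : Decidable (Spec_affine_transformation x out) := by unfold Spec_affine_transformation; infer_instance

-- ===== CLAIM (what is proved, stated in full; the proofs are below) =====
def Claim_equal_affine_transformation : Prop := ∀ (x : Int), Dom_affine_transformation x → Spec_affine_transformation x (affine_transformation x)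

-- ===== LEMMAS AND PROOFS =====

-- Nat: a byte-bounded left operand only sees the low byte of the right operand
theorem nat_land_mod256 (a n : Nat) (ha : a < 256) : a &&& n = a &&& (n % 256) := by
  apply Nat.eq_of_testBit_eq
  intro i
  have h256 : (256 : Nat) = 2 ^ 8 := by norm_num
  rw [Nat.testBit_and, Nat.testBit_and, h256, Nat.testBit_mod_two_pow]
  by_cases hi : i < 8
  · simp [hi]
  · have : a < 2 ^ i := lt_of_lt_of_le ha (by
      calc (256 : Nat) = 2 ^ 8 := by norm_num
      _ ≤ 2 ^ i := Nat.pow_le_pow_right (by norm_num) (by omega))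
    simp [Nat.testBit_lt_two_pow this]

-- Nat, bytes: subtracting the common bits equals AND with the complemented byte
set_option maxRecDepth 10000 in
set_option maxHeartbeats 2000000 in
theorem nat_sub_land : ∀ a < 256, ∀ k < 256, a - (a &&& k) = a &&& (255 - k) := by decide

theorem nat_land255 (k : Nat) (hk : k < 256) : 255 &&& k = k := by
  have : ∀ k < 256, 255 &&& k = k := by set_option maxRecDepth 10000 in decide
  exact this k hk

-- Int: Python's x & 0xFF is x mod 256
theorem band_255 (x : Int) : PySem.Int.band x 255 = x % 256 := by
  by_cases hx : 0 ≤ x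
  · simp only [PySem.Int.band, hx, show (0:Int) ≤ 255 by norm_num, if_pos]
    rw [show ((255:Int).toNat) = 255 from rfl, Nat.and_comm,
        nat_land_mod256 255 x.toNat (by norm_num), nat_land255 _ (Nat.mod_lt _ (by norm_num))]
    omega
  · simp only [PySem.Int.band, hx, if_false, show (0:Int) ≤ 255 by norm_num, if_pos]
    rw [show ((255:Int).toNat) = 255 from rfl,
        nat_land_mod256 255 _ (by norm_num), nat_land255 _ (Nat.mod_lt _ (by norm_num))]
    omega

-- Int: a byte-bounded left operand only sees x mod 256
theorem band_mod (a x : Int) (h0 : 0 ≤ a) (h1 : a < 256) :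
    PySem.Int.band a (x % 256) = PySem.Int.band a x := by
  have hm0 : 0 ≤ x % 256 := Int.emod_nonneg x (by norm_num)
  have hm1 : x % 256 < 256 := Int.emod_lt_of_pos x (by norm_num)
  have hat : a.toNat < 256 := by omega
  by_cases hx : 0 ≤ x
  · simp only [PySem.Int.band, h0, hx, hm0, if_true]
    have : (x % 256).toNat = x.toNat % 256 := by omega
    rw [this, ← nat_land_mod256 _ _ hat]
  · simp only [PySem.Int.band, h0, hx, hm0, if_true, if_false]
    have hmk : (x % 256).toNat = 255 - ((-x - 1).toNat % 256) := by omega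
    rw [hmk, nat_land_mod256 _ ((-x - 1).toNat) hat,
        ← nat_sub_land a.toNat hat _ (Nat.mod_lt _ (by norm_num))]

theorem redA (x : Int) : affine_transformation (x % 256) = affine_transformation x := by
  simp only [affine_transformation, List.foldl_cons, List.foldl_nil]
  rw [band_mod 0xF8 x (by norm_num) (by norm_num), band_mod 0x7C x (by norm_num) (by norm_num),
      band_mod 0x3E x (by norm_num) (by norm_num), band_mod 0x1F x (by norm_num) (by norm_num),
      band_mod 0x8F x (by norm_num) (by norm_num), band_mod 0xC7 x (by norm_num) (by norm_num),
      band_mod 0xE3 x (by norm_num) (by norm_num), band_mod 0xF1 x (by norm_num) (by norm_num)]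

theorem redB (x : Int) : affine_transformation_alt (x % 256) = affine_transformation_alt x := by
  simp only [affine_transformation_alt]
  rw [band_255, band_255, Int.emod_emod_of_dvd x (by norm_num)]

set_option maxRecDepth 10000 in
set_option maxHeartbeats 2000000 in
theorem small_cases : ∀ n : Nat, n < 256 →
    affine_transformation (n : Int) = affine_transformation_alt (n : Int) := by decide

-- ===== VERDICT (by name: the statement is the Claim_ definition above) =====
theorem affine_transformation_spec : Claim_equal_affine_transformation := by
  intro x _
  unfold Spec_affine_transformation
  rw [← redA, ← redB]
  have h0 : 0 ≤ x % 256 := Int.emod_nonneg x (by norm_num)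
  have h1 : x % 256 < 256 := Int.emod_lt_of_pos x (by norm_num)
  have := small_cases (x % 256).toNat (by omega)
  rwa [Int.toNat_of_nonneg h0] at this
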